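-- pv_equiv track=rewrite | github.com/ReactionMechanismGenerator/RMG-Py | rmgpy/molecule/fragment.py | replace_cutting_label
-- ===== SOURCE A (Python) =====
-- def replace_cutting_label(
--     smiles, ind_ranger, cutting_label_list, smiles_replace_dict
-- ):
--     last_end_ind = 0
--     new_smi = ""
--
--     for ind, label_str in enumerate(cutting_label_list):
--         tup = ind_ranger[ind]
--         int_ind = tup[0]
--         end_ind = tup[1]
--
--         element = smiles_replace_dict[label_str]
--
--         if ind == len(cutting_label_list) - 1:
--             new_smi = (
--                 new_smi + smiles[last_end_ind:int_ind] + element + smiles[end_ind:]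
--             )
--         else:
--             new_smi = new_smi + smiles[last_end_ind:int_ind] + element
--
--         last_end_ind = end_ind
--     # if the smiles does not include cutting label
--     if new_smi == "":
--         return smiles
--     return new_smi
-- ===== SOURCE B (Python) =====
-- def replace_cutting_label(
--     smiles, ind_ranger, cutting_label_list, smiles_replace_dict
-- ):
--     # Build the result back-to-front: walk the (range, label) pairs in reverse,
--     # prepending each replacement and the untouched segment that follows it.
--     upper = None
--     out = ""
--     for (start, end), label in reversed(list(zip(ind_ranger, cutting_label_list))):
--         seg = smiles[end:upper] if upper is not None else smiles[end:]
--         out = smiles_replace_dict[label] + seg + out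
--         upper = start
--     out = (smiles[:upper] if upper is not None else smiles) + out
--     return out if out != "" else smiles
-- ===== Notes on version B (the rewrite author's own statement) =====
-- stated objective: alternative
-- what changed: B assembles the result back-to-front by iterating the zipped (range, label) pairs in reverse with an Option boundary carried between steps, instead of A's forward enumerate loop with a running last_end_ind accumulator and a special-cased last iteration.
import Mathlib
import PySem

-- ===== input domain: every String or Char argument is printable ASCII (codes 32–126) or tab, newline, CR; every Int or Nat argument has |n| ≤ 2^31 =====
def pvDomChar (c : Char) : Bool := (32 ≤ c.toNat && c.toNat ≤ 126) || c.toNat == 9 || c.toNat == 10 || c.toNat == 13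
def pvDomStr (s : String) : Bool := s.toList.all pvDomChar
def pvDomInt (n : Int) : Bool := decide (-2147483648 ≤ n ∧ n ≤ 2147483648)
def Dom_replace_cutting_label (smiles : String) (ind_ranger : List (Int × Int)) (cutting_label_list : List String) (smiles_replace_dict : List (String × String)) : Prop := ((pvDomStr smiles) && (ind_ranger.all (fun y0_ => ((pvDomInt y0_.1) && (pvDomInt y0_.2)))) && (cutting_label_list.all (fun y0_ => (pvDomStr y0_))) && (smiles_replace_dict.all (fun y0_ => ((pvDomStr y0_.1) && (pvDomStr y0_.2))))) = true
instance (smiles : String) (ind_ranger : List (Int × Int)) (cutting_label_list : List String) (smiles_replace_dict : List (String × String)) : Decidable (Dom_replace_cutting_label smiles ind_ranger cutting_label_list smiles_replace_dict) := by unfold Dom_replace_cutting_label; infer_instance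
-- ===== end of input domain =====

-- B rebuilds the string back-to-front over reversed (range, label) pairs, removing A's
-- running last_end_ind and last-iteration special case (objective: alternative decomposition).

-- dict lookup (first match in the association list; none = KeyError)
def pyLookup (d : List (String × String)) (k : String) : Option String :=
  (d.find? (fun p => p.1 == k)).map (·.2)

-- ===== PORT A =====
-- loop body of A's 'for ind, label_str in enumerate(cutting_label_list)'; state = (last_end_ind, new_smi)
def pvStepA (smiles : String) (ir : List (Int × Int)) (d : List (String × String)) (n : Int)
    (st : Int × String) (p : Int × String) : Int × String :=
  let tup := (PySem.List.pyGet? ir p.1).getD (0, 0)   -- ind_ranger[ind]; none (IndexError) excluded by Pre_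
  let element := (pyLookup d p.2).getD ""             -- smiles_replace_dict[label_str]; KeyError excluded by Pre_
  if p.1 == n - 1 then
    (tup.2, st.2 ++ PySem.Str.slice smiles (some st.1) (some tup.1) ++ element
              ++ PySem.Str.slice smiles (some tup.2) none)
  else
    (tup.2, st.2 ++ PySem.Str.slice smiles (some st.1) (some tup.1) ++ element)

def replace_cutting_label (smiles : String) (ind_ranger : List (Int × Int)) (cutting_label_list : List String) (smiles_replace_dict : List (String × String)) : String :=
  let res := (PySem.List.enumerate cutting_label_list 0).foldl
    (pvStepA smiles ind_ranger smiles_replace_dict (cutting_label_list.length : Int)) (0, "")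
  if res.2 = "" then smiles else res.2

-- ===== PORT B =====
-- loop body of B's reversed loop; state = (upper, out)
def pvStepB (smiles : String) (d : List (String × String))
    (st : Option Int × String) (p : (Int × Int) × String) : Option Int × String :=
  let seg := match st.1 with
    | some u => PySem.Str.slice smiles (some p.1.2) (some u)
    | none => PySem.Str.slice smiles (some p.1.2) none
  (some p.1.1, (pyLookup d p.2).getD "" ++ seg ++ st.2)

def replace_cutting_label_alt (smiles : String) (ind_ranger : List (Int × Int)) (cutting_label_list : List String) (smiles_replace_dict : List (String × String)) : String :=
  let st := ((ind_ranger.zip cutting_label_list).reverse).foldl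
    (pvStepB smiles smiles_replace_dict) (none, "")
  let out := (match st.1 with
    | some u => PySem.Str.slice smiles none (some u)
    | none => smiles) ++ st.2
  if out = "" then smiles else out

-- ===== PRECONDITION & SPEC =====
-- exactly the inputs where the Python A returns: enough index ranges (else IndexError)
-- and every cutting label present as a key of the dict (else KeyError)
def Pre_replace_cutting_label (smiles : String) (ind_ranger : List (Int × Int)) (cutting_label_list : List String) (smiles_replace_dict : List (String × String)) : Prop :=
  cutting_label_list.length ≤ ind_ranger.length ∧
  ∀ l ∈ cutting_label_list, l ∈ smiles_replace_dict.map (·.1)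
instance (smiles : String) (ind_ranger : List (Int × Int)) (cutting_label_list : List String) (smiles_replace_dict : List (String × String)) : Decidable (Pre_replace_cutting_label smiles ind_ranger cutting_label_list smiles_replace_dict) := by unfold Pre_replace_cutting_label; infer_instance

def pvWitness_replace_cutting_label : String × (List (Int × Int)) × List String × (List (String × String)) :=
  ("CC[L]C", [(2, 5)], ["[L]"], [("[L]", "O")])

def Spec_replace_cutting_label (smiles : String) (ind_ranger : List (Int × Int)) (cutting_label_list : List String) (smiles_replace_dict : List (String × String)) (out : String) : Prop := out = replace_cutting_label_alt smiles ind_ranger cutting_label_list smiles_replace_dict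
instance (smiles : String) (ind_ranger : List (Int × Int)) (cutting_label_list : List String) (smiles_replace_dict : List (String × String)) (out : String) : Decidable (Spec_replace_cutting_label smiles ind_ranger cutting_label_list smiles_replace_dict out) := by unfold Spec_replace_cutting_label; infer_instance

-- ===== CLAIM (what is proved, stated in full; the proofs are below) =====
def Claim_equal_replace_cutting_label : Prop := ∀ (smiles : String) (ind_ranger : List (Int × Int)) (cutting_label_list : List String) (smiles_replace_dict : List (String × String)), Dom_replace_cutting_label smiles ind_ranger cutting_label_list smiles_replace_dict → Pre_replace_cutting_label smiles ind_ranger cutting_label_list smiles_replace_dict → Spec_replace_cutting_label smiles ind_ranger cutting_label_list smiles_replace_dict (replace_cutting_label smiles ind_ranger cutting_label_list smiles_replace_dict)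

-- ===== LEMMAS AND PROOFS =====

-- reference shape: the spliced string for the remaining (range, label) pairs, starting at `last`
def pvSplice (smiles : String) (d : List (String × String)) (last : Int) : List ((Int × Int) × String) → String
  | [] => PySem.Str.slice smiles (some last) none
  | (t, l) :: rest =>
      PySem.Str.slice smiles (some last) (some t.1) ++ (pyLookup d l).getD ""
        ++ pvSplice smiles d t.2 rest

-- B's final assembly, generalized over the left boundary `last`
def pvGlue (smiles : String) (last : Int) (st : Option Int × String) : String :=
  (match st.1 with
    | some u => PySem.Str.slice smiles (some last) (some u)
    | none => PySem.Str.slice smiles (some last) none) ++ st.2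

lemma str_slice_zero_none (s : String) : PySem.Str.slice s (some 0) none = s := by
  apply String.toList_inj.mp
  simp [PySem.Str.toList_slice, PySem.Chars.slice_eq_listSlice]

lemma str_slice_zero_some (s : String) (b : Int) :
    PySem.Str.slice s (some 0) (some b) = PySem.Str.slice s none (some b) := by
  apply String.toList_inj.mp
  simp [PySem.Str.toList_slice, PySem.Chars.slice_eq_listSlice]

-- A's fold over the enumerated tail `ls` (absolute start index s) produces acc ++ the spliced tail
lemma foldA_eq (smiles : String) (ir : List (Int × Int)) (d : List (String × String)) (n : Nat) :
    ∀ (ls : List String) (s : Nat) (last : Int) (acc : String),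
      s + ls.length = n → s + ls.length ≤ ir.length → ls ≠ [] →
      ((PySem.List.enumerate ls (s : Int)).foldl (pvStepA smiles ir d (n : Int)) (last, acc)).2
        = acc ++ pvSplice smiles d last ((ir.drop s).zip ls) := by
  intro ls
  induction ls with
  | nil => intro s last acc _ _ hne; exact absurd rfl hne
  | cons x xs ih =>
    intro s last acc hn hlen _
    have hs : s < ir.length := by simp at hlen; omega
    have hdrop : ir.drop s = ir[s] :: ir.drop (s + 1) := (List.getElem_cons_drop hs).symm
    have htup : (PySem.List.pyGet? ir (s : Int)).getD (0, 0) = ir[s] := by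
      simp [PySem.List.pyGet?_natCast, List.getElem?_eq_getElem hs]
    rw [PySem.List.enumerate_cons, List.foldl_cons]
    cases xs with
    | nil =>
      have hbranch : ((s : Int) == (n : Int) - 1) = true := by
        simp at hn ⊢; omega
      have hzip : (ir.drop s).zip [x] = [(ir[s], x)] := by rw [hdrop]; simp only [List.zip_cons_cons, List.zip_nil_right]; rfl
      simp only [pvStepA, hbranch, if_true, htup, PySem.List.enumerate_nil, List.foldl_nil, hzip]
      simp [pvSplice, String.append_assoc]
      rfl
    | cons y ys =>
      have hbranch : ((s : Int) == (n : Int) - 1) = false := by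
        simp at hn ⊢; omega
      have hcast : (s : Int) + 1 = ((s + 1 : Nat) : Int) := by push_cast; ring
      simp only [pvStepA, hbranch, if_false, Bool.false_eq_true, htup]
      rw [hcast, ih (s + 1) (ir[s]).2
            (acc ++ PySem.Str.slice smiles (some last) (some (ir[s]).1)
              ++ ((pyLookup d x).getD ""))
            (by simp at hn ⊢; omega) (by simp at hlen ⊢; omega) (by simp)]
      have hzip : (ir.drop s).zip (x :: y :: ys) = (ir[s], x) :: ((ir.drop (s + 1)).zip (y :: ys)) := by
        rw [hdrop]; simp only [List.zip_cons_cons]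
      rw [hzip]
      simp [pvSplice, String.append_assoc]

-- B's foldr (= foldl over the reversed pairs), glued at boundary `last`, is the same spliced string
lemma foldB_eq (smiles : String) (d : List (String × String)) :
    ∀ (pairs : List ((Int × Int) × String)) (last : Int),
      pvGlue smiles last (pairs.foldr (fun p st => pvStepB smiles d st p) (none, ""))
        = pvSplice smiles d last pairs := by
  intro pairs
  induction pairs with
  | nil => intro last; simp [pvGlue, pvSplice]
  | cons p rest ih =>
    obtain ⟨⟨a, b⟩, lab⟩ := p
    intro last
    have hrec := ih b
    simp only [List.foldr_cons, pvGlue, pvStepB, pvSplice] at hrec ⊢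
    rw [← hrec]
    cases h : (rest.foldr (fun p st => pvStepB smiles d st p) (none, "")).1 <;>
      simp [String.append_assoc]

-- ===== VERDICT (by name: the statement is the Claim_ definition above) =====
theorem replace_cutting_label_spec : Claim_equal_replace_cutting_label := by
  intro smiles ir labels d _ hPre
  unfold Spec_replace_cutting_label replace_cutting_label replace_cutting_label_alt
  obtain ⟨hlen, _⟩ := hPre
  cases labels with
  | nil =>
    simp [PySem.List.enumerate_nil, String.append_empty]
  | cons x xs =>
    have hA := foldA_eq smiles ir d (x :: xs).length (x :: xs) 0 0 ""
      (by simp) (by simpa using hlen) (by simp)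
    have hB := foldB_eq smiles d (ir.zip (x :: xs)) 0
    rw [← List.foldl_reverse] at hB
    simp only [Nat.cast_zero] at hA
    rw [List.drop_zero] at hA
    simp only [hA, String.empty_append]
    have hglue : ((match ((ir.zip (x :: xs)).reverse.foldl (pvStepB smiles d) (none, "")).1 with
        | some u => PySem.Str.slice smiles none (some u)
        | none => smiles)
          ++ ((ir.zip (x :: xs)).reverse.foldl (pvStepB smiles d) (none, "")).2)
        = pvGlue smiles 0 ((ir.zip (x :: xs)).reverse.foldl (pvStepB smiles d) (none, "")) := by
      unfold pvGlue
      cases ((ir.zip (x :: xs)).reverse.foldl (pvStepB smiles d) (none, "")).1 <;>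
        simp [str_slice_zero_none, str_slice_zero_some]
    rw [hglue, hB]
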